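-- pv_equiv track=rewrite | github.com/ryli3/Projects | Python/Game.py | percentCorrect
-- ===== SOURCE A (Python) =====
-- def percentCorrect(study, testList, answer):
--     correct = 0                                                    #initialize correct to zero
--     correctIndex = []
--
--     for j in range(0, len(testList)):                              #loop through every index in the testList
--         for i in range(0, len(study)):                             #loop through every index in the studyList
--             if testList[j] == study[i]:                            #if they are equal,
--                 correctIndex.append(i)                             #append that value to correctIndex so you can see which questions are right
--                 correct += 1                                       #you got one corret
--
--     if int(correct) >= int(answer):                                #if number of correct questions exceeds the number of questions you need to get right
--         testPass = 1                                               #you pass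
--     else:
--         testPass = 0                                               #you fail
--
--     return testPass, correctIndex, correct
-- ===== SOURCE B (Python) =====
-- def percentCorrect(study, testList, answer):
--     index = {}
--     for i, v in enumerate(study):
--         index.setdefault(v, []).append(i)
--     correctIndex = []
--     for t in testList:
--         correctIndex.extend(index.get(t, []))
--     correct = len(correctIndex)
--     testPass = 1 if correct >= answer else 0
--     return testPass, correctIndex, correct
-- ===== Notes on version B (the rewrite author's own statement) =====
-- stated objective: faster
-- what changed: Replaces the nested scan of study for every test element by a dict from value to its sorted list of study indices built once, then one extend per test element; correct is the length of correctIndex instead of a counter.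
import Mathlib
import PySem

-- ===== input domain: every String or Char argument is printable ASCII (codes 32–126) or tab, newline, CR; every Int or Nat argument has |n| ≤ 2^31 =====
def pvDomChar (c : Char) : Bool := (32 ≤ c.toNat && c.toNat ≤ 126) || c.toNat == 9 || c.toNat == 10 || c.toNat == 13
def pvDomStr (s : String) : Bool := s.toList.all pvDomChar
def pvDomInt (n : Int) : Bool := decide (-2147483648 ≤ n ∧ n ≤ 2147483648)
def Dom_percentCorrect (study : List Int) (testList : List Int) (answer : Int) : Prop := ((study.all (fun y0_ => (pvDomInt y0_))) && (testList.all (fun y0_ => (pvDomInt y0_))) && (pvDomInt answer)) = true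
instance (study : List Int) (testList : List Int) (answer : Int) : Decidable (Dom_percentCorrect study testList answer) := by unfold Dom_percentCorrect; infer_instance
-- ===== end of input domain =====

-- B builds a dict value -> list of study indices once and extends per test element (O(n+m+k))
-- instead of A's rescan of study for every test element (O(n*m)); return values are identical.

-- ===== PORT A =====
def percentCorrect (study : List Int) (testList : List Int) (answer : Int) : Int × List Int × Int :=
  -- state: (correct, correctIndex)
  let s :=
    (PySem.List.pyRange 0 (testList.length : Int) 1).foldl
      (fun (st : Int × List Int) j =>
        (PySem.List.pyRange 0 (study.length : Int) 1).foldl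
          (fun (st : Int × List Int) i =>
            if PySem.List.pyGetD testList j 0 = PySem.List.pyGetD study i 0 then
              (st.1 + 1, st.2 ++ [i])
            else st)
          st)
      (0, [])
  ((if s.1 ≥ answer then (1 : Int) else 0), s.2, s.1)

-- ===== PORT B =====
def percentCorrect_alt (study : List Int) (testList : List Int) (answer : Int) : Int × List Int × Int :=
  -- index.setdefault(v, []).append(i)  ==  index[v] = index.get(v, []) + [i]  ==  Dict.modify
  let index : PySem.Dict Int (List Int) :=
    (PySem.List.enumerate study 0).foldl
      (fun d p => d.modify p.2 [] (fun l => l ++ [p.1])) PySem.Dict.empty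
  let correctIndex := testList.foldl (fun acc t => acc ++ index.getD t []) []
  let correct : Int := correctIndex.length
  ((if correct ≥ answer then (1 : Int) else 0), correctIndex, correct)

-- ===== PRECONDITION & SPEC =====
def Spec_percentCorrect (study : List Int) (testList : List Int) (answer : Int) (out : Int × List Int × Int) : Prop := out = percentCorrect_alt study testList answer
instance (study : List Int) (testList : List Int) (answer : Int) (out : Int × List Int × Int) : Decidable (Spec_percentCorrect study testList answer out) := by unfold Spec_percentCorrect; infer_instance

-- ===== CLAIM (what is proved, stated in full; the proofs are below) =====
def Claim_equal_percentCorrect : Prop := ∀ (study : List Int) (testList : List Int) (answer : Int), Dom_percentCorrect study testList answer → Spec_percentCorrect study testList answer (percentCorrect study testList answer)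

-- ===== LEMMAS AND PROOFS =====

-- the study indices matching value t, in order (as a list of enumerate pairs)
def pvSel (study : List Int) (t : Int) : List Int :=
  ((PySem.List.enumerate study 0).filter (fun p => p.2 == t)).map (·.1)

-- A's inner loop over enumerate pairs
theorem pvInner (l : List (Int × Int)) (t : Int) (st : Int × List Int) :
    l.foldl (fun (st : Int × List Int) p =>
        if t = p.2 then (st.1 + 1, st.2 ++ [p.1]) else st) st
      = (st.1 + ((l.filter (fun p => p.2 == t)).map (·.1)).length,
         st.2 ++ (l.filter (fun p => p.2 == t)).map (·.1)) := by
  induction l generalizing st with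
  | nil => simp
  | cons p l ih =>
    rw [List.foldl_cons, List.filter_cons]
    by_cases h : t = p.2
    · have hb : (p.2 == t) = true := beq_iff_eq.mpr h.symm
      rw [if_pos h, ih, hb]
      simp [Prod.ext_iff]
      omega
    · have hb : (p.2 == t) = false := by
        simp only [beq_eq_false_iff_ne, ne_eq]
        exact fun e => h e.symm
      rw [if_neg h, ih, hb]
      simp

-- A's outer loop over test elements
theorem pvOuter (study : List Int) (l : List Int) (st : Int × List Int) :
    l.foldl (fun (st : Int × List Int) t =>
        (st.1 + (pvSel study t).length, st.2 ++ pvSel study t)) st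
      = (st.1 + (l.flatMap (pvSel study)).length, st.2 ++ l.flatMap (pvSel study)) := by
  induction l generalizing st with
  | nil => simp
  | cons t l ih => simp [List.foldl_cons, ih]; omega

-- B's dict lookup is pvSel
theorem pvDictSel (study : List Int) (t : Int) :
    ((PySem.List.enumerate study 0).foldl
        (fun (d : PySem.Dict Int (List Int)) p => d.modify p.2 [] (fun l => l ++ [p.1]))
        PySem.Dict.empty).getD t []
      = pvSel study t := by
  have h := PySem.Dict.getD_foldl_modify_append
      (l := (PySem.List.enumerate study 0).map (fun p => (p.2, p.1)))
      (d := (PySem.Dict.empty : PySem.Dict Int (List Int))) (c := t)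
  rw [List.foldl_map] at h
  simpa [pvSel, List.filter_map, List.map_map, Function.comp] using h

theorem percentCorrect_eq (study testList : List Int) (answer : Int) :
    percentCorrect study testList answer = percentCorrect_alt study testList answer := by
  unfold percentCorrect percentCorrect_alt
  rw [PySem.List.foldl_pyRange_zero_pyGetD' (xs := testList) (d := 0)
      (f := fun (st : Int × List Int) t =>
        (PySem.List.pyRange 0 (study.length : Int) 1).foldl
          (fun (st : Int × List Int) i =>
            if t = PySem.List.pyGetD study i 0 then (st.1 + 1, st.2 ++ [i])
            else st) st)]
  have hinner : ∀ (st : Int × List Int) (t : Int),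
      (PySem.List.pyRange 0 (study.length : Int) 1).foldl
          (fun (st : Int × List Int) i =>
            if t = PySem.List.pyGetD study i 0 then (st.1 + 1, st.2 ++ [i]) else st) st
        = (st.1 + (pvSel study t).length, st.2 ++ pvSel study t) := by
    intro st t
    have he : PySem.List.enumerate study 0
        = (PySem.List.pyRange 0 (study.length : Int) 1).map
            (fun j => (j, PySem.List.pyGetD study j 0)) :=
      PySem.List.enumerate_eq_map_pyRange (xs := study) (d := 0)
    have := pvInner (PySem.List.enumerate study 0) t st
    rw [he, List.foldl_map] at this
    simpa [pvSel, he] using this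
  simp only [hinner]
  rw [pvOuter]
  rw [PySem.List.foldl_append_eq_flatMap (g := fun t =>
      ((PySem.List.enumerate study 0).foldl
        (fun (d : PySem.Dict Int (List Int)) p => d.modify p.2 [] (fun l => l ++ [p.1]))
        PySem.Dict.empty).getD t [])]
  simp [pvDictSel]

-- ===== VERDICT (by name: the statement is the Claim_ definition above) =====
theorem percentCorrect_spec : Claim_equal_percentCorrect := by
  intro study testList answer _
  unfold Spec_percentCorrect
  exact percentCorrect_eq study testList answer
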